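-- pv_equiv track=rewrite | github.com/benquick123/code-profiling | code/batch-1/vse-naloge-brez-testov/DN7-M-157.py | dolzina_poti
-- ===== SOURCE A (Python) =====
-- def dolzina_poti(pot):
--     prviKorak = 0
--     dolPoti = 0
--     for a, b in pot:
--         if prviKorak == 0:
--             x = a
--             y = b
--             prviKorak = 1
--         dolPoti += abs(x - a) + abs(y - b)
--         x = a
--         y = b
--     return dolPoti
-- ===== SOURCE B (Python) =====
-- def dolzina_poti(pot):
--     n = len(pot)
--
--     def seg(lo, hi):
--         # path length over pot[lo..hi], by splitting the index range at the midpoint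
--         if hi - lo >= 2:
--             mid = (lo + hi) // 2
--             return seg(lo, mid) + seg(mid, hi)
--         if hi - lo == 1:
--             x1, y1 = pot[lo]
--             x2, y2 = pot[hi]
--             return abs(x1 - x2) + abs(y1 - y2)
--         return 0
--
--     return seg(0, n - 1)
-- ===== Notes on version B (the rewrite author's own statement) =====
-- stated objective: alternative
-- what changed: Replaces the sentinel-flag single pass carrying previous x,y with a divide-and-conquer recursion that splits the index range at its midpoint and adds the two half-path lengths.
import Mathlib
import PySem

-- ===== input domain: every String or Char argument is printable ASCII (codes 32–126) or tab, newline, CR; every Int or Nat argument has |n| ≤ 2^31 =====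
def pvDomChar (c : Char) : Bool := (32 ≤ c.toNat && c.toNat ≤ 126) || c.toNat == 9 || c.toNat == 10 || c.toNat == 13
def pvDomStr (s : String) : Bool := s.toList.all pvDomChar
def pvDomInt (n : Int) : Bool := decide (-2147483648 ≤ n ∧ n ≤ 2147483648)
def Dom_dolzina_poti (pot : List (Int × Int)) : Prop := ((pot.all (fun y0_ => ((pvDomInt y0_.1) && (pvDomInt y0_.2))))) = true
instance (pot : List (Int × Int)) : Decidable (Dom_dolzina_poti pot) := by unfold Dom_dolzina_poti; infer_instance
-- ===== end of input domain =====

-- B replaces A's sentinel-flag single pass (carrying previous x,y) with a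
-- divide-and-conquer recursion splitting the index range at its midpoint;
-- objective: alternative, same cost.

-- ===== PORT A =====
-- state = (prviKorak, x, y, dolPoti); x,y start at 0 but are overwritten before
-- first use (prviKorak = 0 initially), matching Python's unbound-then-assigned x,y.
def dolzina_poti (pot : List (Int × Int)) : Int :=
  (pot.foldl
    (fun (s : Int × Int × Int × Int) ab =>
      let (prviKorak, x, y, dolPoti) := s
      let (a, b) := ab
      let (x, y, prviKorak) := if prviKorak == 0 then (a, b, (1 : Int)) else (x, y, prviKorak)
      let dolPoti := dolPoti + |x - a| + |y - b|
      (prviKorak, a, b, dolPoti))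
    (0, 0, 0, 0)).2.2.2

-- ===== PORT B =====
-- seg lo hi = path length over pot[lo..hi].  Indices use Nat: every call from
-- dolzina_poti_alt keeps 0 ≤ lo ≤ hi < len, so pot.getD is exact Python indexing
-- there; for the empty list Python calls seg(0, -1) and this port seg 0 0 — both
-- hit the trivial branch and return 0.
def segB (pot : List (Int × Int)) (lo hi : Nat) : Int :=
  if lo + 2 ≤ hi then
    segB pot lo ((lo + hi) / 2) + segB pot ((lo + hi) / 2) hi
  else if lo + 1 = hi then
    let p := pot.getD lo (0, 0)
    let q := pot.getD hi (0, 0)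
    |p.1 - q.1| + |p.2 - q.2|
  else 0
termination_by hi - lo
decreasing_by all_goals omega

def dolzina_poti_alt (pot : List (Int × Int)) : Int :=
  segB pot 0 (pot.length - 1)

-- ===== PRECONDITION & SPEC =====
def Spec_dolzina_poti (pot : List (Int × Int)) (out : Int) : Prop := out = dolzina_poti_alt pot
instance (pot : List (Int × Int)) (out : Int) : Decidable (Spec_dolzina_poti pot out) := by unfold Spec_dolzina_poti; infer_instance

-- ===== CLAIM (what is proved, stated in full; the proofs are below) =====
def Claim_equal_dolzina_poti : Prop := ∀ (pot : List (Int × Int)), Dom_dolzina_poti pot → Spec_dolzina_poti pot (dolzina_poti pot)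

-- ===== LEMMAS AND PROOFS =====

-- Manhattan distance of step i of the path (indices via getD, as in segB).
def stepB (pot : List (Int × Int)) (i : Nat) : Int :=
  |(pot.getD i (0, 0)).1 - (pot.getD (i + 1) (0, 0)).1| +
  |(pot.getD i (0, 0)).2 - (pot.getD (i + 1) (0, 0)).2|

-- segB sums the steps of its index range.
theorem segB_eq_sum (pot : List (Int × Int)) :
    ∀ lo hi : Nat, segB pot lo hi = ∑ i ∈ Finset.Ico lo hi, stepB pot i := by
  intro lo hi
  induction hgen : hi - lo using Nat.strong_induction_on generalizing lo hi with
  | _ n ih =>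
    rw [segB]
    split_ifs with h2 h1
    · have hm1 : lo < (lo + hi) / 2 := by omega
      have hm2 : (lo + hi) / 2 < hi := by omega
      rw [ih (((lo + hi) / 2) - lo) (by omega) lo _ rfl,
          ih (hi - ((lo + hi) / 2)) (by omega) _ hi rfl,
          Finset.sum_Ico_consecutive _ (by omega) (by omega)]
    · subst h1
      simp [stepB]
    · have : Finset.Ico lo hi = ∅ := by
        apply Finset.Ico_eq_empty; omega
      simp [this]

-- A's fold, after the first element has seeded (x, y), adds the remaining steps
-- of (x, y) :: rest to the accumulator.
theorem dolzina_poti_fold_after_first (pot : List (Int × Int)) :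
    ∀ (x y acc : Int),
      ((pot.foldl
        (fun (s : Int × Int × Int × Int) ab =>
          let (prviKorak, x, y, dolPoti) := s
          let (a, b) := ab
          let (x, y, prviKorak) := if prviKorak == 0 then (a, b, (1 : Int)) else (x, y, prviKorak)
          let dolPoti := dolPoti + |x - a| + |y - b|
          (prviKorak, a, b, dolPoti))
        (1, x, y, acc)).2.2.2)
      = acc + ∑ i ∈ Finset.range pot.length, stepB ((x, y) :: pot) i := by
  induction pot with
  | nil => intro x y acc; simp
  | cons hd tl ih =>
    intro x y acc
    obtain ⟨a, b⟩ := hd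
    rw [List.foldl_cons]
    refine (ih a b (acc + |x - a| + |y - b|)).trans ?_
    simp only [List.length_cons]
    rw [Finset.sum_range_succ']
    have hshift : ∀ i : Nat,
        stepB ((x, y) :: (a, b) :: tl) (i + 1) = stepB ((a, b) :: tl) i := by
      intro i; simp [stepB]
    simp only [hshift]
    have h0 : stepB ((x, y) :: (a, b) :: tl) 0 = |x - a| + |y - b| := by
      simp [stepB]
    rw [h0]
    ring

-- ===== VERDICT (by name: the statement is the Claim_ definition above) =====
theorem dolzina_poti_spec : Claim_equal_dolzina_poti := by
  intro pot _
  unfold Spec_dolzina_poti dolzina_poti_alt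
  rw [segB_eq_sum]
  cases pot with
  | nil => simp [dolzina_poti]
  | cons hd tl =>
    obtain ⟨a, b⟩ := hd
    unfold dolzina_poti
    rw [List.foldl_cons]
    refine (dolzina_poti_fold_after_first tl a b (0 + |a - a| + |b - b|)).trans ?_
    simp
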